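-- pv_equiv track=rewrite | github.com/SharpJype/generate | lib/datapck.py | listmove
-- ===== SOURCE A (Python) =====
-- def listmove(l, i, ii): # move an item to another index
--     if type(l) in [list,str]:
--         i = i%len(l)
--         ii = ii%len(l)
--         if type(l) in [list]:
--             ii, i = max(i, ii), min(i, ii)
--             p = l[i]
--             for j in range(i, ii): l[j] = l[j+1]
--             l[ii] = p
--         elif type(l) in [str]:
--             p = l[i]
--             l = l[:i]+l[i+1:]
--             l = l[:ii]+p+l[ii:]
--     return l
-- ===== SOURCE B (Python) =====
-- def listmove(l, i, ii): # move an item to another index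
--     if type(l) in [list, str]:
--         i = i % len(l)
--         ii = ii % len(l)
--         if type(l) in [list]:
--             lo, hi = min(i, ii), max(i, ii)
--             # remove the earlier element and re-insert it at the later index
--             l.insert(hi, l.pop(lo))
--         elif type(l) in [str]:
--             p = l[i]
--             l = l[:i]+l[i+1:]
--             l = l[:ii]+p+l[ii:]
--     return l
-- ===== Notes on version B (the rewrite author's own statement) =====
-- stated objective: simpler
-- what changed: The list branch's element-by-element shift loop with final write-back is replaced by the list primitives pop/insert: l.insert(hi, l.pop(lo)) removes the earlier element and re-inserts it at the later index.
import Mathlib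
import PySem

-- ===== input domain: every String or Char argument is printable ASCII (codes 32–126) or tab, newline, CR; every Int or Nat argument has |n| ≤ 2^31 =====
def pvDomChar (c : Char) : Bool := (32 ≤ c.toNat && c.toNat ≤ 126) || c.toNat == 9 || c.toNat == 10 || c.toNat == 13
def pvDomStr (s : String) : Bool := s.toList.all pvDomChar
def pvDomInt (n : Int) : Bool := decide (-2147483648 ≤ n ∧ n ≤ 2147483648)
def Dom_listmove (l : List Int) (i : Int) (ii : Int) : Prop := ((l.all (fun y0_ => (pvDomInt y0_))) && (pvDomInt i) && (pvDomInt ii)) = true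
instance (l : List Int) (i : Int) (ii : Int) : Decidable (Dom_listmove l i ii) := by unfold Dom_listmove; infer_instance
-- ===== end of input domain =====

-- B replaces A's element-by-element shift loop and final write-back with the list
-- primitives pop/insert (objective: simpler). Both A and B mutate the list argument in
-- place in Python, identically; the equivalence proved here is about the return value.

-- ===== PORT A =====
-- literal port of A's list branch: i,ii reduced mod len, normalized to (min,max),
-- then the shift loop 'for j in range(i, ii): l[j] = l[j+1]' and finally 'l[ii] = p'.
def listmove (l : List Int) (i : Int) (ii : Int) : List Int :=
  let i' := PySem.Int.mod i (l.length : Int)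
  let ii' := PySem.Int.mod ii (l.length : Int)
  let lo := min i' ii'
  let hi := max i' ii'
  let p := PySem.List.pyGetD l lo 0
  let l' := (PySem.List.pyRange lo hi 1).foldl
      (fun acc j => PySem.List.pySetD acc j (PySem.List.pyGetD acc (j + 1) 0)) l
  PySem.List.pySetD l' hi p

-- ===== PORT B =====
-- literal port of B: same normalization, then 'l.insert(hi, l.pop(lo))' — pop the
-- earlier element and re-insert it at the later index. l.pop(lo) never raises here
-- (0 ≤ lo < len), so the 'none' arm is unreachable; it returns l unchanged.
def listmove_alt (l : List Int) (i : Int) (ii : Int) : List Int :=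
  let lo := min (PySem.Int.mod i (l.length : Int)) (PySem.Int.mod ii (l.length : Int))
  let hi := max (PySem.Int.mod i (l.length : Int)) (PySem.Int.mod ii (l.length : Int))
  match PySem.List.pop? l lo with
  | some (p, rest) => PySem.List.insert rest hi p
  | none => l

-- ===== PRECONDITION & SPEC =====
-- Pre_ excludes only the empty list, on which A (and B) raise ZeroDivisionError at 'i % len(l)'.
def Pre_listmove (l : List Int) (i : Int) (ii : Int) : Prop := l ≠ []
instance (l : List Int) (i : Int) (ii : Int) : Decidable (Pre_listmove l i ii) := by unfold Pre_listmove; infer_instance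
def pvWitness_listmove : List Int × Int × Int := ([3, 1, 4, 1, 5], 1, 3)

def Spec_listmove (l : List Int) (i : Int) (ii : Int) (out : List Int) : Prop := out = listmove_alt l i ii
instance (l : List Int) (i : Int) (ii : Int) (out : List Int) : Decidable (Spec_listmove l i ii out) := by unfold Spec_listmove; infer_instance

-- ===== CLAIM (what is proved, stated in full; the proofs are below) =====
def Claim_equal_listmove : Prop := ∀ (l : List Int) (i : Int) (ii : Int), Dom_listmove l i ii → Pre_listmove l i ii → Spec_listmove l i ii (listmove l i ii)

-- ===== LEMMAS AND PROOFS =====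

-- The shift loop, run from index a for k steps (with a + k < len), turns l into
-- take a ++ (drop (a+1)).take k ++ drop (a+k): positions a..a+k-1 get shifted left,
-- position a+k onwards is still untouched.
theorem shift_fold (l : List Int) (a k : Nat) (h : a + k < l.length) :
    (PySem.List.pyRange (a : Int) ((a : Int) + (k : Int)) 1).foldl
      (fun acc j => PySem.List.pySetD acc j (PySem.List.pyGetD acc (j + 1) 0)) l
    = l.take a ++ (l.drop (a + 1)).take k ++ l.drop (a + k) := by
  induction k with
  | zero => simp [PySem.List.pyRange_one_eq_nil]
  | succ k ih =>
    have hk : a + k < l.length := by omega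
    have hsplit : PySem.List.pyRange (a : Int) ((a : Int) + ((k+1 : Nat) : Int)) 1
        = PySem.List.pyRange (a : Int) ((a : Int) + (k : Int)) 1 ++ [((a + k : Nat) : Int)] := by
      push_cast
      rw [show (a : Int) + ((k : Int) + 1) = ((a : Int) + (k : Int)) + 1 by ring]
      rw [PySem.List.pyRange_one_succ_right (by omega)]
    rw [hsplit, List.foldl_append, ih hk]
    simp only [List.foldl_cons, List.foldl_nil]
    set M := l.take a ++ (l.drop (a + 1)).take k ++ l.drop (a + k) with hM
    have hlenseg : ((l.drop (a + 1)).take k).length = k := by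
      simp [List.length_take, List.length_drop]; omega
    have hlenta : (l.take a).length = a := by simp; omega
    have hget : PySem.List.pyGetD M (((a + k : Nat) : Int) + 1) 0 = l[a + k + 1]'(by omega) := by
      rw [show ((a + k : Nat) : Int) + 1 = ((a + k + 1 : Nat) : Int) by norm_cast]
      rw [PySem.List.pyGetD_natCast]
      rw [hM]
      rw [List.getD_eq_getElem?_getD]
      rw [List.getElem?_append_right (by simp [hlenta, hlenseg])]
      rw [List.getElem?_drop]
      simp [hlenta, hlenseg, List.getElem?_eq_getElem (show a + k + 1 < l.length by omega)]
    rw [hget, PySem.List.pySetD_natCast]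
    rw [hM]
    rw [List.set_append, List.set_append]
    simp only [hlenta, hlenseg, List.length_append]
    rw [show a + k - (a + k) = 0 by omega]
    have hdrop : l.drop (a + k) = l[a + k]'(by omega) :: l.drop (a + k + 1) :=
      List.drop_eq_getElem_cons (by omega)
    rw [hdrop]
    simp only [List.set_cons_zero]
    have htake : (l.drop (a + 1)).take (k + 1)
        = (l.drop (a + 1)).take k ++ [l[a + k + 1]'(by omega)] := by
      rw [List.take_add_one]
      congr 1
      rw [List.getElem?_drop]
      rw [show a + 1 + k = a + k + 1 by omega]
      simp [List.getElem?_eq_getElem (by omega : a + k + 1 < l.length)]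
    rw [htake]
    simp [show a + (k+1) = a + k + 1 by omega]

theorem listmove_spec : Claim_equal_listmove := by
  intro l i ii _ hpre
  unfold Spec_listmove listmove listmove_alt
  have hlen : 0 < l.length := List.length_pos_iff.mpr hpre
  have hn : (0 : Int) < (l.length : Int) := by exact_mod_cast hlen
  simp only []
  set i' := PySem.Int.mod i (l.length : Int) with hi'
  set ii' := PySem.Int.mod ii (l.length : Int) with hii'
  have h1 : 0 ≤ i' := PySem.Int.mod_nonneg i hn
  have h2 : i' < (l.length : Int) := PySem.Int.mod_lt i hn
  have h3 : 0 ≤ ii' := PySem.Int.mod_nonneg ii hn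
  have h4 : ii' < (l.length : Int) := PySem.Int.mod_lt ii hn
  set lo := min i' ii' with hlo
  set hi := max i' ii' with hhi
  obtain ⟨a, ha⟩ : ∃ a : Nat, lo = (a : Int) :=
    ⟨lo.toNat, (Int.toNat_of_nonneg (le_min h1 h3)).symm⟩
  obtain ⟨b, hb⟩ : ∃ b : Nat, hi = (b : Int) :=
    ⟨hi.toNat, (Int.toNat_of_nonneg (le_max_of_le_left h1)).symm⟩
  have hab : a ≤ b := by
    have : lo ≤ hi := min_le_max
    rw [ha, hb] at this; exact_mod_cast this
  have hbl : b < l.length := by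
    have : hi < (l.length : Int) := max_lt h2 h4
    rw [hb] at this; exact_mod_cast this
  have hal : a < l.length := by omega
  rw [ha, hb]
  -- A side: the shift loop
  rw [show (b : Int) = (a : Int) + ((b - a : Nat) : Int) by push_cast; omega]
  rw [shift_fold l a (b - a) (by omega)]
  rw [show a + (b - a) = b by omega]
  rw [show (a : Int) + ((b - a : Nat) : Int) = ((b : Nat) : Int) by push_cast; omega]
  rw [PySem.List.pySetD_natCast, PySem.List.pyGetD_natCast]
  -- B side: pop then insert
  rw [PySem.List.pop?_natCast l a hal]
  dsimp only
  have hrest : (l.eraseIdx a).length = l.length - 1 := by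
    simp [List.length_eraseIdx, hal]
  rw [PySem.List.insert_natCast _ b _ (by omega : b ≤ (l.eraseIdx a).length)]
  rw [List.eraseIdx_eq_take_drop_succ]
  have hlenta : (l.take a).length = a := by simp; omega
  have hlenseg : ((l.drop (a + 1)).take (b - a)).length = b - a := by
    simp [List.length_take, List.length_drop]; omega
  -- rest.take b = take a ++ (drop (a+1)).take (b-a), rest.drop b = drop (b+1)
  rw [List.take_append, List.drop_append]
  simp only [hlenta]
  rw [List.drop_drop]
  rw [show a + 1 + (b - a) = b + 1 by omega]
  -- A side: resolve the final set
  rw [List.set_append, List.set_append]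
  simp only [hlenta, hlenseg, List.length_append]
  rw [show b - (a + (b - a)) = 0 by omega]
  have hdropb : l.drop b = l[b]'(by omega) :: l.drop (b + 1) :=
    List.drop_eq_getElem_cons (by omega)
  rw [hdropb, List.set_cons_zero]
  rw [if_neg (by omega)]
  have : l.getD a 0 = l[a]'hal := List.getD_eq_getElem l 0 hal
  rw [this]
  have h5 : List.take b (List.take a l) = List.take a l := by
    rw [List.take_take]; congr 1; omega
  have h6 : List.drop b (List.take a l) = [] :=
    List.drop_eq_nil_of_le (by rw [hlenta]; omega)
  rw [h5, h6]
  simp
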